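-- pv_equiv track=rewrite | github.com/perseron/CitoStore | vision-usb-gateway/src/vision_webui/server.py | validate_config_updates
-- ===== SOURCE A (Python) =====
-- def validate_config_updates(updates: dict) -> tuple[bool, str]:
--     if "NETBIOS_NAME" in updates:
--         name = updates["NETBIOS_NAME"]
--         if not name or len(name) > 15 or not name.replace("-", "").replace("_", "").isalnum():
--             return False, "NETBIOS_NAME must be 1-15 alphanumeric characters"
--     if "SMB_WORKGROUP" in updates:
--         wg = updates["SMB_WORKGROUP"]
--         if not wg or len(wg) > 15 or not wg.replace("-", "").replace("_", "").isalnum():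
--             return False, "SMB_WORKGROUP must be 1-15 alphanumeric characters"
--     if "SMB_BIND_INTERFACE" in updates:
--         iface = updates["SMB_BIND_INTERFACE"]
--         if not iface or not all(c.isalnum() or c in "._:-" for c in iface):
--             return False, "SMB_BIND_INTERFACE contains invalid characters"
--     for key in ("SYNC_INTERVAL_SEC", "SYNC_ONBOOT_SEC", "SYNC_ONACTIVE_SEC"):
--         if key in updates:
--             val = updates[key]
--             if not val or not all(c.isalnum() for c in val):
--                 return False, f"{key} must be a systemd time string like 30s or 2min"
--     if "WEBUI_PORT" in updates:
--         try:
--             port = int(updates["WEBUI_PORT"])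
--             if port < 1 or port > 65535:
--                 return False, "WEBUI_PORT out of range"
--         except ValueError:
--             return False, "WEBUI_PORT must be a number"
--     if "WEBUI_BIND" in updates:
--         bind = updates["WEBUI_BIND"]
--         if bind not in ("0.0.0.0", "127.0.0.1") and not all(
--             c.isalnum() or c in ".:-" for c in bind
--         ):
--             return False, "WEBUI_BIND contains invalid characters"
--     if "NAS_ENABLED" in updates:
--         if updates["NAS_ENABLED"] not in ("true", "false"):
--             return False, "NAS_ENABLED must be true or false"
--     for key in ("BYDATE_USE_FILE_TIME", "RAW_APPEND_ALWAYS"):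
--         if key in updates and updates[key] not in ("true", "false"):
--             return False, f"{key} must be true or false"
--     return True, ""
-- ===== SOURCE B (Python) =====
-- # One pass over the submitted items (not over the field list): each present key is
-- # classified and validated on the fly, and the failure with the smallest field
-- # priority is kept; A instead walks the fixed field list with early returns.
--
-- _FIELDS = (
--     "NETBIOS_NAME", "SMB_WORKGROUP", "SMB_BIND_INTERFACE",
--     "SYNC_INTERVAL_SEC", "SYNC_ONBOOT_SEC", "SYNC_ONACTIVE_SEC",
--     "WEBUI_PORT", "WEBUI_BIND", "NAS_ENABLED",
--     "BYDATE_USE_FILE_TIME", "RAW_APPEND_ALWAYS",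
-- )
-- _PRIORITY = {k: i for i, k in enumerate(_FIELDS)}
--
--
-- def _check(key, v):
--     if key in ("NETBIOS_NAME", "SMB_WORKGROUP"):
--         if not v or len(v) > 15 or not v.replace("-", "").replace("_", "").isalnum():
--             return f"{key} must be 1-15 alphanumeric characters"
--     elif key == "SMB_BIND_INTERFACE":
--         if not v or not all(c.isalnum() or c in "._:-" for c in v):
--             return "SMB_BIND_INTERFACE contains invalid characters"
--     elif key in ("SYNC_INTERVAL_SEC", "SYNC_ONBOOT_SEC", "SYNC_ONACTIVE_SEC"):
--         if not v or not all(c.isalnum() for c in v):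
--             return f"{key} must be a systemd time string like 30s or 2min"
--     elif key == "WEBUI_PORT":
--         try:
--             port = int(v)
--         except ValueError:
--             return "WEBUI_PORT must be a number"
--         if port < 1 or port > 65535:
--             return "WEBUI_PORT out of range"
--     elif key == "WEBUI_BIND":
--         if v not in ("0.0.0.0", "127.0.0.1") and not all(
--             c.isalnum() or c in ".:-" for c in v
--         ):
--             return "WEBUI_BIND contains invalid characters"
--     else:  # the three boolean flags
--         if v not in ("true", "false"):
--             return f"{key} must be true or false"
--     return None
--
--
-- def validate_config_updates(updates: dict) -> tuple[bool, str]: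
--     best = None
--     for key, val in updates.items():
--         prio = _PRIORITY.get(key)
--         if prio is None:
--             continue
--         msg = _check(key, val)
--         if msg is not None and (best is None or prio < best[0]):
--             best = (prio, msg)
--     return (True, "") if best is None else (False, best[1])
-- ===== Notes on version B (the rewrite author's own statement) =====
-- stated objective: alternative
-- what changed: Instead of A's fixed chain of per-field checks with early returns (driven by the field list), B makes a single pass over the submitted items, classifying and validating each key as it is seen and keeping the failure of the highest-priority (earliest) field in a min-accumulator.
import Mathlib
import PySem

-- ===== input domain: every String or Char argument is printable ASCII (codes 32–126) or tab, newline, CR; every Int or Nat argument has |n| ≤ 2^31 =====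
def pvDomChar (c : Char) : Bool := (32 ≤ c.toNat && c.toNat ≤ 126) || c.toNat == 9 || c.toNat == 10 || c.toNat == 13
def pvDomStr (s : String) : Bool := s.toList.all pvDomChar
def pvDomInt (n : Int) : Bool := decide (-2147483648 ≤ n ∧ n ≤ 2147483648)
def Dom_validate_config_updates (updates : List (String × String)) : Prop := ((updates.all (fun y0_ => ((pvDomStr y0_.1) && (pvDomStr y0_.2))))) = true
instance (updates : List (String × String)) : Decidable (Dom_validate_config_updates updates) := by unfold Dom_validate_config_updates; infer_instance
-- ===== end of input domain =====

-- B replaces A's fixed chain of per-field checks (early returns) by one pass over the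
-- submitted items keeping the failure of the earliest field (objective: alternative).

-- ===== PORT A =====
-- A's early-return straight-line code: each step checks one key and falls through to the next.
-- helper loop for `for key in ("SYNC_INTERVAL_SEC", ...)`: some msg = early return
def aSyncLoop (d : PySem.Dict String String) : List String → Option String
  | [] => none
  | k :: rest =>
    match d.get? k with
    | some v =>
      if v.toList.isEmpty || !(v.toList.all PySem.Chars.isalnum)
      then some (k ++ " must be a systemd time string like 30s or 2min")
      else aSyncLoop d rest
    | none => aSyncLoop d rest

-- helper loop for `for key in ("BYDATE_USE_FILE_TIME", "RAW_APPEND_ALWAYS")` (last statement before final return)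
def aBoolLoop (d : PySem.Dict String String) : List String → Bool × String
  | [] => (true, "")
  | k :: rest =>
    match d.get? k with
    | some v =>
      if !(v == "true" || v == "false") then (false, k ++ " must be true or false")
      else aBoolLoop d rest
    | none => aBoolLoop d rest

def aStep8 (d : PySem.Dict String String) : Bool × String :=
  aBoolLoop d ["BYDATE_USE_FILE_TIME", "RAW_APPEND_ALWAYS"]

def aStep7 (d : PySem.Dict String String) : Bool × String :=
  match d.get? "NAS_ENABLED" with
  | some v => if !(v == "true" || v == "false") then (false, "NAS_ENABLED must be true or false") else aStep8 d
  | none => aStep8 d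

def aStep6 (d : PySem.Dict String String) : Bool × String :=
  match d.get? "WEBUI_BIND" with
  | some bind =>
    if !(bind == "0.0.0.0" || bind == "127.0.0.1")
       && !(bind.toList.all (fun c => PySem.Chars.isalnum c || ['.', ':', '-'].contains c))
    then (false, "WEBUI_BIND contains invalid characters")
    else aStep7 d
  | none => aStep7 d

def aStep5 (d : PySem.Dict String String) : Bool × String :=
  match d.get? "WEBUI_PORT" with
  | some v =>
    match PySem.Int.ofStr? v with
    | some port =>
      if port < 1 || 65535 < port then (false, "WEBUI_PORT out of range") else aStep6 d
    | none => (false, "WEBUI_PORT must be a number")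
  | none => aStep6 d

def aStep4 (d : PySem.Dict String String) : Bool × String :=
  match aSyncLoop d ["SYNC_INTERVAL_SEC", "SYNC_ONBOOT_SEC", "SYNC_ONACTIVE_SEC"] with
  | some msg => (false, msg)
  | none => aStep5 d

def aStep3 (d : PySem.Dict String String) : Bool × String :=
  match d.get? "SMB_BIND_INTERFACE" with
  | some iface =>
    if iface.toList.isEmpty
       || !(iface.toList.all (fun c => PySem.Chars.isalnum c || ['.', '_', ':', '-'].contains c))
    then (false, "SMB_BIND_INTERFACE contains invalid characters")
    else aStep4 d
  | none => aStep4 d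

def aStep2 (d : PySem.Dict String String) : Bool × String :=
  match d.get? "SMB_WORKGROUP" with
  | some wg =>
    if wg.toList.isEmpty || 15 < wg.toList.length
       || !(PySem.Chars.strIsalnum (PySem.Chars.replace (PySem.Chars.replace wg.toList ['-'] []) ['_'] []))
    then (false, "SMB_WORKGROUP must be 1-15 alphanumeric characters")
    else aStep3 d
  | none => aStep3 d

def validate_config_updates (updates : List (String × String)) : Bool × String :=
  let d := PySem.Dict.mk updates
  match d.get? "NETBIOS_NAME" with
  | some name =>
    if name.toList.isEmpty || 15 < name.toList.length
       || !(PySem.Chars.strIsalnum (PySem.Chars.replace (PySem.Chars.replace name.toList ['-'] []) ['_'] []))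
    then (false, "NETBIOS_NAME must be 1-15 alphanumeric characters")
    else aStep2 d
  | none => aStep2 d

-- ===== PORT B =====
-- Source B: `_FIELDS` tuple and the per-key classifier `_check`
def bFields : List String :=
  ["NETBIOS_NAME", "SMB_WORKGROUP", "SMB_BIND_INTERFACE",
   "SYNC_INTERVAL_SEC", "SYNC_ONBOOT_SEC", "SYNC_ONACTIVE_SEC",
   "WEBUI_PORT", "WEBUI_BIND", "NAS_ENABLED",
   "BYDATE_USE_FILE_TIME", "RAW_APPEND_ALWAYS"]

def bCheck (key v : String) : Option String :=
  if key == "NETBIOS_NAME" || key == "SMB_WORKGROUP" then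
    if v.toList.isEmpty || 15 < v.toList.length
       || !(PySem.Chars.strIsalnum (PySem.Chars.replace (PySem.Chars.replace v.toList ['-'] []) ['_'] []))
    then some (key ++ " must be 1-15 alphanumeric characters") else none
  else if key == "SMB_BIND_INTERFACE" then
    if v.toList.isEmpty
       || !(v.toList.all (fun c => PySem.Chars.isalnum c || ['.', '_', ':', '-'].contains c))
    then some ("SMB_BIND_INTERFACE contains invalid characters") else none
  else if key == "SYNC_INTERVAL_SEC" || key == "SYNC_ONBOOT_SEC" || key == "SYNC_ONACTIVE_SEC" then
    if v.toList.isEmpty || !(v.toList.all PySem.Chars.isalnum)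
    then some (key ++ " must be a systemd time string like 30s or 2min") else none
  else if key == "WEBUI_PORT" then
    match PySem.Int.ofStr? v with
    | none => some "WEBUI_PORT must be a number"
    | some port => if port < 1 || 65535 < port then some "WEBUI_PORT out of range" else none
  else if key == "WEBUI_BIND" then
    if !(v == "0.0.0.0" || v == "127.0.0.1")
       && !(v.toList.all (fun c => PySem.Chars.isalnum c || ['.', ':', '-'].contains c))
    then some ("WEBUI_BIND contains invalid characters") else none
  else
    if !(v == "true" || v == "false") then some (key ++ " must be true or false") else none

-- `_PRIORITY.get(key)`: position of key in _FIELDS (the dict maps each field to its index)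
def bLook : List String → Nat → String → Option Nat
  | [], _, _ => none
  | k' :: rest, i, k => if k' == k then some i else bLook rest (i + 1) k

-- `updates.items()`: the assoc list stands for a Python dict, so each key is
-- enumerated once with its first binding (exact for any list representing a dict)
def bDedup (seen : List String) : List (String × String) → List (String × String)
  | [] => []
  | (k, v) :: rest =>
    if seen.contains k then bDedup seen rest
    else (k, v) :: bDedup (k :: seen) rest

-- loop body: record the failure if its field priority beats the best so far
def bStep (best : Option (Nat × String)) (kv : String × String) : Option (Nat × String) :=
  match bLook bFields 0 kv.1 with
  | none => best
  | some prio =>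
    match bCheck kv.1 kv.2 with
    | none => best
    | some m =>
      match best with
      | none => some (prio, m)
      | some b => if prio < b.1 then some (prio, m) else best

def validate_config_updates_alt (updates : List (String × String)) : Bool × String :=
  match (bDedup [] updates).foldl bStep none with
  | none => (true, "")
  | some (_, m) => (false, m)

-- ===== PRECONDITION & SPEC =====
def Spec_validate_config_updates (updates : List (String × String)) (out : Bool × String) : Prop := out = validate_config_updates_alt updates
instance (updates : List (String × String)) (out : Bool × String) : Decidable (Spec_validate_config_updates updates out) := by unfold Spec_validate_config_updates; infer_instance

-- ===== CLAIM (what is proved, stated in full; the proofs are below) =====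
def Claim_equal_validate_config_updates : Prop := ∀ (updates : List (String × String)), Dom_validate_config_updates updates → Spec_validate_config_updates updates (validate_config_updates updates)

-- ===== LEMMAS AND PROOFS =====
-- proof-side helpers: a sequential first-failure scan characterising A, and the
-- min-combiner characterising B's fold
def renderSeq : Option (Nat × String) → Bool × String
  | none => (true, "")
  | some (_, m) => (false, m)

def seqF (d : PySem.Dict String String) : List String → Nat → Option (Nat × String)
  | [], _ => none
  | k :: rest, i =>
    match d.get? k with
    | some v =>
      match bCheck k v with
      | some m => some (i, m)
      | none => seqF d rest (i + 1)
    | none => seqF d rest (i + 1)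

def evalKV (kv : String × String) : Option (Nat × String) :=
  match bLook bFields 0 kv.1 with
  | none => none
  | some i => (bCheck kv.1 kv.2).map (fun m => (i, m))

def comb (best : Option (Nat × String)) (p : Nat × String) : Option (Nat × String) :=
  match best with
  | none => some p
  | some b => if p.1 < b.1 then some p else some b

theorem seqF_cons (d : PySem.Dict String String) (k : String) (rest : List String) (i : Nat) :
    seqF d (k :: rest) i =
      match (d.get? k).bind (bCheck k) with
      | some m => some (i, m)
      | none => seqF d rest (i + 1) := by
  cases hg : d.get? k with
  | none => simp [seqF, hg]
  | some v => cases hc : bCheck k v <;> simp [seqF, hg, hc]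

-- bCheck at each literal key (by computation)
theorem bCheck_netbios (v : String) : bCheck "NETBIOS_NAME" v =
    (if v.toList.isEmpty || 15 < v.toList.length
        || !(PySem.Chars.strIsalnum (PySem.Chars.replace (PySem.Chars.replace v.toList ['-'] []) ['_'] []))
     then some "NETBIOS_NAME must be 1-15 alphanumeric characters" else none) := rfl

theorem bCheck_workgroup (v : String) : bCheck "SMB_WORKGROUP" v =
    (if v.toList.isEmpty || 15 < v.toList.length
        || !(PySem.Chars.strIsalnum (PySem.Chars.replace (PySem.Chars.replace v.toList ['-'] []) ['_'] []))
     then some "SMB_WORKGROUP must be 1-15 alphanumeric characters" else none) := rfl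

theorem bCheck_iface (v : String) : bCheck "SMB_BIND_INTERFACE" v =
    (if v.toList.isEmpty
        || !(v.toList.all (fun c => PySem.Chars.isalnum c || ['.', '_', ':', '-'].contains c))
     then some "SMB_BIND_INTERFACE contains invalid characters" else none) := rfl

theorem bCheck_sync1 (v : String) : bCheck "SYNC_INTERVAL_SEC" v =
    (if v.toList.isEmpty || !(v.toList.all PySem.Chars.isalnum)
     then some "SYNC_INTERVAL_SEC must be a systemd time string like 30s or 2min" else none) := rfl

theorem bCheck_sync2 (v : String) : bCheck "SYNC_ONBOOT_SEC" v =
    (if v.toList.isEmpty || !(v.toList.all PySem.Chars.isalnum)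
     then some "SYNC_ONBOOT_SEC must be a systemd time string like 30s or 2min" else none) := rfl

theorem bCheck_sync3 (v : String) : bCheck "SYNC_ONACTIVE_SEC" v =
    (if v.toList.isEmpty || !(v.toList.all PySem.Chars.isalnum)
     then some "SYNC_ONACTIVE_SEC must be a systemd time string like 30s or 2min" else none) := rfl

theorem bCheck_port (v : String) : bCheck "WEBUI_PORT" v =
    (match PySem.Int.ofStr? v with
     | none => some "WEBUI_PORT must be a number"
     | some port => if port < 1 || 65535 < port then some "WEBUI_PORT out of range" else none) := rfl

theorem bCheck_bind (v : String) : bCheck "WEBUI_BIND" v =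
    (if !(v == "0.0.0.0" || v == "127.0.0.1")
        && !(v.toList.all (fun c => PySem.Chars.isalnum c || ['.', ':', '-'].contains c))
     then some "WEBUI_BIND contains invalid characters" else none) := rfl

theorem bCheck_nas (v : String) : bCheck "NAS_ENABLED" v =
    (if !(v == "true" || v == "false") then some "NAS_ENABLED must be true or false" else none) := rfl

theorem bCheck_bydate (v : String) : bCheck "BYDATE_USE_FILE_TIME" v =
    (if !(v == "true" || v == "false") then some "BYDATE_USE_FILE_TIME must be true or false" else none) := rfl

theorem bCheck_raw (v : String) : bCheck "RAW_APPEND_ALWAYS" v =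
    (if !(v == "true" || v == "false") then some "RAW_APPEND_ALWAYS must be true or false" else none) := rfl

theorem bStep_eq (best : Option (Nat × String)) (kv : String × String) :
    bStep best kv = match evalKV kv with | none => best | some p => comb best p := by
  unfold bStep evalKV comb
  cases bLook bFields 0 kv.1 with
  | none => rfl
  | some i => cases bCheck kv.1 kv.2 <;> cases best <;> rfl

theorem foldl_bStep (l : List (String × String)) :
    ∀ acc, l.foldl bStep acc = (l.filterMap evalKV).foldl comb acc := by
  induction l with
  | nil => intro acc; rfl
  | cons kv rest ih =>
    intro acc
    simp only [List.foldl_cons, List.filterMap_cons, bStep_eq]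
    cases h : evalKV kv with
    | none => simp [ih]
    | some p => simp [ih]

theorem comb_spec (E : List (Nat × String)) :
    ∀ acc, (E = [] ∧ E.foldl comb acc = acc) ∨
      ∃ p, E.foldl comb acc = some p ∧ (p ∈ E ∨ acc = some p) ∧
        (∀ q ∈ E, p.1 ≤ q.1) ∧ (∀ a, acc = some a → p.1 ≤ a.1) := by
  induction E with
  | nil => intro acc; exact Or.inl ⟨rfl, rfl⟩
  | cons e rest ih =>
    intro acc
    right
    have hacc : ∃ x, comb acc e = some x ∧ (x = e ∨ acc = some x) ∧ x.1 ≤ e.1 ∧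
        (∀ a, acc = some a → x.1 ≤ a.1) := by
      cases acc with
      | none => exact ⟨e, rfl, Or.inl rfl, le_refl _, by simp⟩
      | some b =>
        by_cases h : e.1 < b.1
        · exact ⟨e, by simp [comb, h], Or.inl rfl, le_refl _, by intro a ha; cases ha; omega⟩
        · exact ⟨b, by simp [comb, h], Or.inr rfl, by omega, by intro a ha; cases ha; omega⟩
    obtain ⟨x, hx, hxmem, hxle, hxacc⟩ := hacc
    rcases ih (comb acc e) with ⟨hnil, hfold⟩ | ⟨p, hp, hpmem, hpmin, hpacc⟩
    · subst hnil
      refine ⟨x, by simpa using hfold ▸ hx, ?_, ?_, hxacc⟩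
      · rcases hxmem with h | h
        · exact Or.inl (by simp [h])
        · exact Or.inr h
      · intro q hq
        simp only [List.mem_cons] at hq
        rcases hq with rfl | h
        · exact hxle
        · simp at h
    · refine ⟨p, by simpa using hp, ?_, ?_, ?_⟩
      · rcases hpmem with h | h
        · exact Or.inl (List.mem_cons_of_mem _ h)
        · rw [hx] at h; injection h with h'
          rcases hxmem with h2 | h2
          · exact Or.inl (by simp [← h', h2])
          · exact Or.inr (by rw [h2, h'])
      · intro q hq
        simp only [List.mem_cons] at hq
        rcases hq with rfl | h
        · exact le_trans (hpacc x hx) hxle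
        · exact hpmin q h
      · intro a ha
        exact le_trans (hpacc x hx) (hxacc a ha)

-- bDedup enumerates exactly the dict's bindings (first match per key)
theorem bDedup_mem (us : List (String × String)) :
    ∀ seen k v, ((k, v) ∈ bDedup seen us ↔ seen.contains k = false ∧ (PySem.Dict.mk us).get? k = some v) := by
  induction us with
  | nil => intro seen k v; simp [bDedup, PySem.Dict.get?]
  | cons kv rest ih =>
    intro seen k v
    obtain ⟨k0, v0⟩ := kv
    by_cases hs : k0 ∈ seen
    · rw [show bDedup seen ((k0, v0) :: rest) = bDedup seen rest from by simp [bDedup, hs]]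
      rw [PySem.Dict.get?_mk_cons]
      by_cases hk : k0 = k
      · subst hk; simp [ih seen, hs]
      · simp [ih seen, Ne.symm hk, hk]
    · rw [show bDedup seen ((k0, v0) :: rest) = (k0, v0) :: bDedup (k0 :: seen) rest from by
        simp [bDedup, hs]]
      rw [PySem.Dict.get?_mk_cons]
      by_cases hk : k0 = k
      · subst hk; simp [ih (k0 :: seen), hs, eq_comm]
      · simp [ih (k0 :: seen), Ne.symm hk, hk, hs]

theorem bLook_at (t : List String) (k : String) :
    ∀ i j, bLook t i k = some j → ∃ off, j = i + off ∧ t[off]? = some k := by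
  induction t with
  | nil => intro i j h; simp [bLook] at h
  | cons k0 rest ih =>
    intro i j h
    unfold bLook at h
    by_cases he : k0 == k
    · rw [if_pos he] at h
      injection h with h'
      exact ⟨0, by omega, by simpa using (eq_of_beq he)⟩
    · rw [if_neg he] at h
      obtain ⟨off, hoff, hget⟩ := ih (i + 1) j h
      exact ⟨off + 1, by omega, by simpa using hget⟩

theorem bLook_of_at (t : List String) (k : String) (hnd : t.Nodup) :
    ∀ i off, t[off]? = some k → bLook t i k = some (i + off) := by
  induction t with
  | nil => intro i off h; simp at h
  | cons k0 rest ih =>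
    intro i off h
    cases off with
    | zero =>
      simp at h
      subst h
      simp [bLook]
    | succ off' =>
      simp at h
      have hne : (k0 == k) = false := by
        have hm : k ∈ rest := List.mem_of_getElem? h
        have := (List.nodup_cons.mp hnd).1
        simp only [beq_eq_false_iff_ne, ne_eq]
        intro he; exact this (he ▸ hm)
      have := ih (List.nodup_cons.mp hnd).2 (i + 1) off' h
      simp [bLook, hne, this]
      omega

theorem seqF_none (d : PySem.Dict String String) (t : List String) :
    ∀ i, seqF d t i = none → ∀ k ∈ t, (d.get? k).bind (bCheck k) = none := by
  induction t with
  | nil => intro i _ k hk; simp at hk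
  | cons k0 rest ih =>
    intro i h k hk
    rw [seqF_cons] at h
    cases hb : (d.get? k0).bind (bCheck k0) with
    | some m => simp [hb] at h
    | none =>
      simp only [hb] at h
      rcases List.mem_cons.mp hk with rfl | hk'
      · exact hb
      · exact ih (i + 1) h k hk'

theorem seqF_some (d : PySem.Dict String String) (t : List String) :
    ∀ i j m, seqF d t i = some (j, m) →
      ∃ off k, j = i + off ∧ t[off]? = some k ∧ (d.get? k).bind (bCheck k) = some m := by
  induction t with
  | nil => intro i j m h; simp [seqF] at h
  | cons k0 rest ih =>
    intro i j m h
    rw [seqF_cons] at h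
    cases hb : (d.get? k0).bind (bCheck k0) with
    | some m0 =>
      simp only [hb] at h
      obtain ⟨h1, h2⟩ := Prod.mk.inj (Option.some.inj h)
      exact ⟨0, k0, by omega, by simp, by rw [hb, h2]⟩
    | none =>
      simp only [hb] at h
      obtain ⟨off, k, h1, h2, h3⟩ := ih (i + 1) j m h
      exact ⟨off + 1, k, by omega, by simpa using h2, h3⟩

theorem seqF_min (d : PySem.Dict String String) (t : List String) :
    ∀ i j m, seqF d t i = some (j, m) →
      ∀ off k, i + off < j → t[off]? = some k → (d.get? k).bind (bCheck k) = none := by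
  induction t with
  | nil => intro i j m h; simp [seqF] at h
  | cons k0 rest ih =>
    intro i j m h off k hlt hget
    rw [seqF_cons] at h
    cases hb : (d.get? k0).bind (bCheck k0) with
    | some m0 =>
      simp only [hb] at h
      have : j = i := ((Prod.mk.inj (Option.some.inj h)).1).symm
      omega
    | none =>
      simp only [hb] at h
      cases off with
      | zero => simp at hget; subst hget; exact hb
      | succ off' =>
        simp at hget
        exact ih (i + 1) j m h off' k (by omega) hget

-- A equals the sequential first-failure scan over bFields
theorem step8_eq (d : PySem.Dict String String) :
    aStep8 d = renderSeq (seqF d ["BYDATE_USE_FILE_TIME", "RAW_APPEND_ALWAYS"] 9) := by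
  rw [seqF_cons, seqF_cons]
  simp only [aStep8, aBoolLoop]
  cases h1 : d.get? "BYDATE_USE_FILE_TIME" with
  | none =>
    simp only [Option.bind_none]
    cases h2 : d.get? "RAW_APPEND_ALWAYS" with
    | none => rfl
    | some v =>
      simp only [Option.bind_some, bCheck_raw]
      cases hc : (!(v == "true" || v == "false")) <;> simp [renderSeq, seqF, hc]
  | some v =>
    simp only [Option.bind_some, bCheck_bydate]
    cases hc : (!(v == "true" || v == "false")) with
    | true => simp [renderSeq, seqF, hc]
    | false =>
      simp only [hc, if_false, Bool.false_eq_true]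
      cases h2 : d.get? "RAW_APPEND_ALWAYS" with
      | none => rfl
      | some w =>
        simp only [Option.bind_some, bCheck_raw]
        cases hc2 : (!(w == "true" || w == "false")) <;> simp [renderSeq, seqF, hc2]

theorem step7_eq (d : PySem.Dict String String) :
    aStep7 d = renderSeq (seqF d (bFields.drop 8) 8) := by
  simp only [bFields, List.drop_succ_cons, List.drop_zero]
  rw [seqF_cons]
  simp only [aStep7]
  cases h : d.get? "NAS_ENABLED" with
  | none => simp only [Option.bind_none]; exact step8_eq d
  | some v =>
    simp only [Option.bind_some, bCheck_nas]
    cases hc : (!(v == "true" || v == "false")) with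
    | true => simp [renderSeq, hc]
    | false => simp only [hc, if_false, Bool.false_eq_true]; exact step8_eq d

theorem step6_eq (d : PySem.Dict String String) :
    aStep6 d = renderSeq (seqF d (bFields.drop 7) 7) := by
  have h7 := step7_eq d
  simp only [bFields, List.drop_succ_cons, List.drop_zero] at h7 ⊢
  rw [seqF_cons]
  simp only [aStep6]
  cases h : d.get? "WEBUI_BIND" with
  | none => simp only [Option.bind_none]; exact h7
  | some v =>
    simp only [Option.bind_some, bCheck_bind]
    cases hc : (!(v == "0.0.0.0" || v == "127.0.0.1")
        && !(v.toList.all (fun c => PySem.Chars.isalnum c || ['.', ':', '-'].contains c))) with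
    | true => simp [renderSeq, hc]
    | false => simp only [hc, if_false, Bool.false_eq_true]; exact h7

theorem step5_eq (d : PySem.Dict String String) :
    aStep5 d = renderSeq (seqF d (bFields.drop 6) 6) := by
  have h6 := step6_eq d
  simp only [bFields, List.drop_succ_cons, List.drop_zero] at h6 ⊢
  rw [seqF_cons]
  simp only [aStep5]
  cases h : d.get? "WEBUI_PORT" with
  | none => simp only [Option.bind_none]; exact h6
  | some v =>
    simp only [Option.bind_some, bCheck_port]
    cases hp : PySem.Int.ofStr? v with
    | none => simp [renderSeq]
    | some port =>
      cases hc : (decide (port < 1) || decide (65535 < port)) with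
      | true => simp [renderSeq, hc]
      | false => simp only [hc, if_false, Bool.false_eq_true]; exact h6

theorem step4_eq (d : PySem.Dict String String) :
    aStep4 d = renderSeq (seqF d (bFields.drop 3) 3) := by
  have h5 := step5_eq d
  simp only [bFields, List.drop_succ_cons, List.drop_zero] at h5 ⊢
  rw [seqF_cons, seqF_cons, seqF_cons]
  simp only [aStep4, aSyncLoop]
  cases h1 : d.get? "SYNC_INTERVAL_SEC" with
  | some v =>
    simp only [Option.bind_some, bCheck_sync1]
    cases hc : (v.toList.isEmpty || !(v.toList.all PySem.Chars.isalnum)) with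
    | true => simp [renderSeq, hc]
    | false =>
      simp only [hc, if_false, Bool.false_eq_true]
      cases h2 : d.get? "SYNC_ONBOOT_SEC" with
      | some w =>
        simp only [Option.bind_some, bCheck_sync2]
        cases hc2 : (w.toList.isEmpty || !(w.toList.all PySem.Chars.isalnum)) with
        | true => simp [renderSeq, hc2]
        | false =>
          simp only [hc2, if_false, Bool.false_eq_true]
          cases h3 : d.get? "SYNC_ONACTIVE_SEC" with
          | some u =>
            simp only [Option.bind_some, bCheck_sync3]
            cases hc3 : (u.toList.isEmpty || !(u.toList.all PySem.Chars.isalnum)) with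
            | true => simp [renderSeq, hc3]
            | false => simp only [hc3, if_false, Bool.false_eq_true]; exact h5
          | none => simp only [Option.bind_none]; exact h5
      | none =>
        simp only [Option.bind_none]
        cases h3 : d.get? "SYNC_ONACTIVE_SEC" with
        | some u =>
          simp only [Option.bind_some, bCheck_sync3]
          cases hc3 : (u.toList.isEmpty || !(u.toList.all PySem.Chars.isalnum)) with
          | true => simp [renderSeq, hc3]
          | false => simp only [hc3, if_false, Bool.false_eq_true]; exact h5
        | none => simp only [Option.bind_none]; exact h5
  | none =>
    simp only [Option.bind_none]
    cases h2 : d.get? "SYNC_ONBOOT_SEC" with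
    | some w =>
      simp only [Option.bind_some, bCheck_sync2]
      cases hc2 : (w.toList.isEmpty || !(w.toList.all PySem.Chars.isalnum)) with
      | true => simp [renderSeq, hc2]
      | false =>
        simp only [hc2, if_false, Bool.false_eq_true]
        cases h3 : d.get? "SYNC_ONACTIVE_SEC" with
        | some u =>
          simp only [Option.bind_some, bCheck_sync3]
          cases hc3 : (u.toList.isEmpty || !(u.toList.all PySem.Chars.isalnum)) with
          | true => simp [renderSeq, hc3]
          | false => simp only [hc3, if_false, Bool.false_eq_true]; exact h5
        | none => simp only [Option.bind_none]; exact h5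
    | none =>
      simp only [Option.bind_none]
      cases h3 : d.get? "SYNC_ONACTIVE_SEC" with
      | some u =>
        simp only [Option.bind_some, bCheck_sync3]
        cases hc3 : (u.toList.isEmpty || !(u.toList.all PySem.Chars.isalnum)) with
        | true => simp [renderSeq, hc3]
        | false => simp only [hc3, if_false, Bool.false_eq_true]; exact h5
      | none => simp only [Option.bind_none]; exact h5

theorem step3_eq (d : PySem.Dict String String) :
    aStep3 d = renderSeq (seqF d (bFields.drop 2) 2) := by
  have h4 := step4_eq d
  simp only [bFields, List.drop_succ_cons, List.drop_zero] at h4 ⊢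
  rw [seqF_cons]
  simp only [aStep3]
  cases h : d.get? "SMB_BIND_INTERFACE" with
  | none => simp only [Option.bind_none]; exact h4
  | some v =>
    simp only [Option.bind_some, bCheck_iface]
    cases hc : (v.toList.isEmpty
        || !(v.toList.all (fun c => PySem.Chars.isalnum c || ['.', '_', ':', '-'].contains c))) with
    | true => simp [renderSeq, hc]
    | false => simp only [hc, if_false, Bool.false_eq_true]; exact h4

theorem step2_eq (d : PySem.Dict String String) :
    aStep2 d = renderSeq (seqF d (bFields.drop 1) 1) := by
  have h3 := step3_eq d
  simp only [bFields, List.drop_succ_cons, List.drop_zero] at h3 ⊢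
  rw [seqF_cons]
  simp only [aStep2]
  cases h : d.get? "SMB_WORKGROUP" with
  | none => simp only [Option.bind_none]; exact h3
  | some v =>
    simp only [Option.bind_some, bCheck_workgroup]
    cases hc : (v.toList.isEmpty || decide (15 < v.toList.length)
        || !(PySem.Chars.strIsalnum (PySem.Chars.replace (PySem.Chars.replace v.toList ['-'] []) ['_'] []))) with
    | true => simp [renderSeq, hc]
    | false => simp only [hc, if_false, Bool.false_eq_true]; exact h3

theorem a_eq_seq (updates : List (String × String)) :
    validate_config_updates updates = renderSeq (seqF (PySem.Dict.mk updates) bFields 0) := by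
  set d := PySem.Dict.mk updates with hd
  have h2 := step2_eq d
  simp only [bFields, List.drop_succ_cons, List.drop_zero] at h2
  show (match d.get? "NETBIOS_NAME" with
    | some name =>
      if name.toList.isEmpty || 15 < name.toList.length
         || !(PySem.Chars.strIsalnum (PySem.Chars.replace (PySem.Chars.replace name.toList ['-'] []) ['_'] []))
      then (false, "NETBIOS_NAME must be 1-15 alphanumeric characters")
      else aStep2 d
    | none => aStep2 d) = renderSeq (seqF d bFields 0)
  rw [show bFields = "NETBIOS_NAME" ::
    ["SMB_WORKGROUP", "SMB_BIND_INTERFACE", "SYNC_INTERVAL_SEC", "SYNC_ONBOOT_SEC",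
     "SYNC_ONACTIVE_SEC", "WEBUI_PORT", "WEBUI_BIND", "NAS_ENABLED",
     "BYDATE_USE_FILE_TIME", "RAW_APPEND_ALWAYS"] from rfl]
  rw [seqF_cons]
  cases h : d.get? "NETBIOS_NAME" with
  | none => simp only [Option.bind_none]; exact h2
  | some v =>
    simp only [Option.bind_some, bCheck_netbios]
    cases hc : (v.toList.isEmpty || decide (15 < v.toList.length)
        || !(PySem.Chars.strIsalnum (PySem.Chars.replace (PySem.Chars.replace v.toList ['-'] []) ['_'] []))) with
    | true => simp [renderSeq, hc]
    | false => simp only [hc, if_false, Bool.false_eq_true]; exact h2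

theorem bFields_nodup : bFields.Nodup := by decide

-- ===== VERDICT (by name: the statement is the Claim_ definition above) =====
theorem validate_config_updates_spec : Claim_equal_validate_config_updates := by
  intro updates _
  unfold Spec_validate_config_updates
  rw [a_eq_seq]
  set d := PySem.Dict.mk updates with hd
  unfold validate_config_updates_alt
  rw [foldl_bStep]
  set E := (bDedup [] updates).filterMap evalKV with hE
  cases hs : seqF d bFields 0 with
  | none =>
    have hEnil : E = [] := by
      rw [List.eq_nil_iff_forall_not_mem]
      intro q hq
      rw [hE, List.mem_filterMap] at hq
      obtain ⟨kv, hkv, hev⟩ := hq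
      unfold evalKV at hev
      cases hl : bLook bFields 0 kv.1 with
      | none => rw [hl] at hev; simp at hev
      | some i =>
        obtain ⟨off, _, hget⟩ := bLook_at bFields kv.1 0 i hl
        have hkin : kv.1 ∈ bFields := List.mem_of_getElem? hget
        have hget? : d.get? kv.1 = some kv.2 :=
          ((bDedup_mem updates [] kv.1 kv.2).mp (Prod.mk.eta ▸ hkv)).2
        have hnone := seqF_none d bFields 0 hs kv.1 hkin
        rw [hget?] at hnone
        simp only [Option.bind_some] at hnone
        rw [hl, hnone] at hev
        simp at hev
    rw [hEnil]
    rfl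
  | some jm =>
    obtain ⟨j, m⟩ := jm
    obtain ⟨off, k, hoff, hget, hbind⟩ := seqF_some d bFields 0 j m hs
    simp only [Nat.zero_add] at hoff
    subst hoff
    cases hg : d.get? k with
    | none => rw [hg] at hbind; simp at hbind
    | some v =>
    rw [hg] at hbind
    simp only [Option.bind_some] at hbind
    have hmemD : (k, v) ∈ bDedup [] updates :=
      (bDedup_mem updates [] k v).mpr ⟨rfl, hg⟩
    have hevk : evalKV (k, v) = some (j, m) := by
      unfold evalKV
      rw [show bLook bFields 0 k = some (0 + j) from bLook_of_at bFields k bFields_nodup 0 j hget]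
      simp [hbind]
    have hmemE : (j, m) ∈ E := by
      rw [hE, List.mem_filterMap]
      exact ⟨(k, v), hmemD, hevk⟩
    rcases comb_spec E none with ⟨hnil, _⟩ | ⟨p, hp, hpmem, hpmin, _⟩
    · rw [hnil] at hmemE; simp at hmemE
    · rcases hpmem with hpE | habs
      swap
      · simp at habs
      rw [hE, List.mem_filterMap] at hpE
      obtain ⟨kv', hkv', hev'⟩ := hpE
      unfold evalKV at hev'
      cases hl' : bLook bFields 0 kv'.1 with
      | none => rw [hl'] at hev'; simp at hev'
      | some i' =>
        rw [hl'] at hev'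
        cases hc' : bCheck kv'.1 kv'.2 with
        | none => rw [hc'] at hev'; simp at hev'
        | some m' =>
          rw [hc'] at hev'
          simp only [Option.map_some] at hev'
          injection hev' with hev''
          have hget' : bFields[i']? = some kv'.1 := by
            obtain ⟨j2, hoff2, hg2⟩ := bLook_at bFields kv'.1 0 i' hl'
            rw [show i' = j2 from by omega]
            exact hg2
          have hget?' : d.get? kv'.1 = some kv'.2 :=
            ((bDedup_mem updates [] kv'.1 kv'.2).mp (Prod.mk.eta ▸ hkv')).2
          have hple : p.1 ≤ j := hpmin (j, m) hmemE
          have hp1 : p.1 = i' := by rw [← hev'']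
          have hoffle : j ≤ p.1 := by
            by_contra hlt
            push_neg at hlt
            have hmin := seqF_min d bFields 0 j m hs p.1 kv'.1 (by omega) (hp1 ▸ hget')
            rw [hget?'] at hmin
            simp only [Option.bind_some] at hmin
            rw [hmin] at hc'
            simp at hc'
          have hpeq : p.1 = j := by omega
          have hkeq : kv'.1 = k := by
            have : bFields[j]? = some kv'.1 := by rw [← hpeq, hp1]; exact hget'
            rw [this] at hget
            exact Option.some.inj hget
          have hpfin : p = (j, m) := by
            have hv : kv'.2 = v := by
              rw [hkeq, hg] at hget?'
              exact (Option.some.inj hget?').symm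
            have hm : m' = m := by
              rw [hkeq, hv] at hc'
              rw [hc'] at hbind
              exact Option.some.inj hbind
            calc p = (i', m') := hev''.symm
            _ = (j, m) := by rw [hm, show i' = j from by rw [← hp1, hpeq]]
          rw [hp, hpfin]
          rfl
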